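-- pv_equiv track=rewrite | github.com/MozhiJiawei/Huawei_OJ | OJ_Python/OJ_Python_3.5/yanghui_triangle.py | generate_yh_triangle
-- ===== SOURCE A (Python) =====
-- def generate_yh_triangle(N, flag=False):
--     result = [[1]]
--     for i in range(1, N):
--         row_i = []
--         for j in range(2 * i + 1):
--             up_left = 0 if j not in range(2, 2 * i + 1) else result[i - 1][j - 2]
--             up = 0 if j not in range(1, 2 * i) else result[i - 1][j - 1]
--             up_right = 0 if j not in range(2 * i - 1) else result[i - 1][j]
--             if flag:
--                 if (up_left + up + up_right) % 2 == 0: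
--                     row_i.append(0)
--                 else:
--                     row_i.append(1)
--             else:
--                 row_i.append(up_left + up + up_right)
--         result.append(row_i)
--     return result
-- ===== SOURCE B (Python) =====
-- def generate_yh_triangle(N, flag=False):
--     # Row n holds the coefficients of (1+x+x^2)^n.  Each row is generated
--     # independently, left to right, by the holonomic (P-recursive) in-row
--     # recurrence (k+1)*T(n,k+1) = (n-k)*T(n,k) + (2n-k+1)*T(n,k-1), with exact
--     # division; no row is derived from the previous one.
--     result = [[1]]
--     for n in range(1, N):
--         row = [1, n]
--         for k in range(1, 2 * n):
--             row.append(((n - k) * row[k] + (2 * n - k + 1) * row[k - 1]) // (k + 1))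
--         if flag:
--             row = [v % 2 for v in row]
--         result.append(row)
--     return result
-- ===== Notes on version B (the rewrite author's own statement) =====
-- stated objective: alternative
-- what changed: B drops the row-from-previous-row neighbour-sum recurrence entirely: each row n is the coefficient list of (1+x+x^2)^n and is generated independently, left to right, by the holonomic in-row recurrence (k+1)*T(n,k+1) = (n-k)*T(n,k) + (2n-k+1)*T(n,k-1) with exact integer division, reducing mod 2 afterwards when flag is set.
import Mathlib
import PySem

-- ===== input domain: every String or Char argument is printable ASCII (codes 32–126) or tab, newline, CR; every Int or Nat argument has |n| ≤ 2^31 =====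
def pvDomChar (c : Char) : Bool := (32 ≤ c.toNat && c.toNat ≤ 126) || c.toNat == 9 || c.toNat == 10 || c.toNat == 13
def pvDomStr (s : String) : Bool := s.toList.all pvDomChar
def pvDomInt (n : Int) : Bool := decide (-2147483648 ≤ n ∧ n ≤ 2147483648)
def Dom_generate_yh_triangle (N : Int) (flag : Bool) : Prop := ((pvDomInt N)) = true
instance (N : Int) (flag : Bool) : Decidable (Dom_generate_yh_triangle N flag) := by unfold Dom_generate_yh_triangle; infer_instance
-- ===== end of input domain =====

-- B abandons the neighbour-sum recurrence: each row n is the coefficient list of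
-- (1+x+x^2)^n, generated independently left-to-right by the holonomic in-row
-- recurrence (k+1)T(n,k+1) = (n-k)T(n,k) + (2n-k+1)T(n,k-1); objective: alternative.

-- ===== PORT A =====
-- `j not in range(lo, hi)` (step 1) is `¬ (lo ≤ j ∧ j < hi)`; inside the guarded branches the
-- indices `i-1` into result and `j-2`/`j-1`/`j` into result[i-1] are always in range, so pyGetD
-- with defaults []/0 is exact there.
def generate_yh_triangle (N : Int) (flag : Bool) : List (List Int) :=
  (PySem.List.pyRange 1 N 1).foldl
    (fun result i =>
      let row_i := (PySem.List.pyRange 0 (2 * i + 1) 1).foldl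
        (fun row_i j =>
          let up_left := if ¬ (2 ≤ j ∧ j < 2 * i + 1) then 0
            else PySem.List.pyGetD (PySem.List.pyGetD result (i - 1) []) (j - 2) 0
          let up := if ¬ (1 ≤ j ∧ j < 2 * i) then 0
            else PySem.List.pyGetD (PySem.List.pyGetD result (i - 1) []) (j - 1) 0
          let up_right := if ¬ (0 ≤ j ∧ j < 2 * i - 1) then 0
            else PySem.List.pyGetD (PySem.List.pyGetD result (i - 1) []) j 0
          if flag then
            if PySem.Int.mod (up_left + up + up_right) 2 = 0 then row_i ++ [0]
            else row_i ++ [1]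
          else row_i ++ [up_left + up + up_right])
        []
      result ++ [row_i])
    [[1]]

-- ===== PORT B =====
-- row[k] / row[k-1] are always in range (0 ≤ k-1 < k < len row), so pyGetD is exact.
def generate_yh_triangle_alt (N : Int) (flag : Bool) : List (List Int) :=
  (PySem.List.pyRange 1 N 1).foldl
    (fun result n =>
      let row := (PySem.List.pyRange 1 (2 * n) 1).foldl
        (fun row k =>
          row ++ [PySem.Int.floordiv
            ((n - k) * PySem.List.pyGetD row k 0
              + (2 * n - k + 1) * PySem.List.pyGetD row (k - 1) 0) (k + 1)])
        [1, n]
      let row := if flag then row.map (fun v => PySem.Int.mod v 2) else row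
      result ++ [row])
    [[1]]

-- ===== PRECONDITION & SPEC =====
def Spec_generate_yh_triangle (N : Int) (flag : Bool) (out : List (List Int)) : Prop := out = generate_yh_triangle_alt N flag
instance (N : Int) (flag : Bool) (out : List (List Int)) : Decidable (Spec_generate_yh_triangle N flag out) := by unfold Spec_generate_yh_triangle; infer_instance

-- ===== CLAIM (what is proved, stated in full; the proofs are below) =====
def Claim_equal_generate_yh_triangle : Prop := ∀ (N : Int) (flag : Bool), Dom_generate_yh_triangle N flag → Spec_generate_yh_triangle N flag (generate_yh_triangle N flag)

-- ===== LEMMAS AND PROOFS =====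

-- the common middle object: coefficient k of (1+X+X^2)^n
noncomputable def pvC (n k : ℕ) : ℤ :=
  (((1 + Polynomial.X + Polynomial.X ^ 2 : Polynomial ℤ)) ^ n).coeff k

lemma pv_tri_coeff (p : Polynomial ℤ) (k : ℕ) :
    ((1 + Polynomial.X + Polynomial.X ^ 2) * p).coeff k
      = p.coeff k + (if 1 ≤ k then p.coeff (k - 1) else 0)
        + (if 2 ≤ k then p.coeff (k - 2) else 0) := by
  have h : (1 + Polynomial.X + Polynomial.X ^ 2) * p
      = p * 1 + p * Polynomial.X ^ 1 + p * Polynomial.X ^ 2 := by ring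
  rw [h, Polynomial.coeff_add, Polynomial.coeff_add, mul_one,
    Polynomial.coeff_mul_X_pow', Polynomial.coeff_mul_X_pow']

lemma pvC_succ (n k : ℕ) :
    pvC (n + 1) k = pvC n k + (if 1 ≤ k then pvC n (k - 1) else 0)
      + (if 2 ≤ k then pvC n (k - 2) else 0) := by
  unfold pvC
  rw [pow_succ']
  exact pv_tri_coeff _ _

lemma pvC_base (k : ℕ) : pvC 0 k = if k = 0 then 1 else 0 := by
  unfold pvC
  simp [Polynomial.coeff_one]

lemma pvC_zero (n : ℕ) : pvC n 0 = 1 := by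
  induction n with
  | zero => simp [pvC_base]
  | succ m ih => simp [pvC_succ, ih]

lemma pvC_one (n : ℕ) : pvC n 1 = n := by
  induction n with
  | zero => simp [pvC_base]
  | succ m ih => simp [pvC_succ, ih, pvC_zero]

lemma pvC_eq_zero {n k : ℕ} (h : 2 * n < k) : pvC n k = 0 := by
  induction n generalizing k with
  | zero => rw [pvC_base]; simp; omega
  | succ m ih =>
    have h1 : pvC m k = 0 := ih (by omega)
    have h2 : pvC m (k - 1) = 0 := ih (by omega)
    have h3 : pvC m (k - 2) = 0 := ih (by omega)
    rw [pvC_succ]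
    simp [h1, h2, h3]

-- the holonomic in-row recurrence, from (1+X+X^2) * d/dX (1+X+X^2)^n = n (1+2X) (1+X+X^2)^n
lemma pvC_holo (n k : ℕ) (hk : 1 ≤ k) :
    ((k : ℤ) + 1) * pvC n (k + 1)
      = ((n : ℤ) - k) * pvC n k + (2 * n - k + 1) * pvC n (k - 1) := by
  have key : (1 + Polynomial.X + Polynomial.X ^ 2 : Polynomial ℤ)
        * Polynomial.derivative ((1 + Polynomial.X + Polynomial.X ^ 2 : Polynomial ℤ) ^ n)
      = Polynomial.C (n : ℤ)
        * (((1 + 2 * Polynomial.X) * (1 + Polynomial.X + Polynomial.X ^ 2 : Polynomial ℤ) ^ n)) := by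
    have hdp : Polynomial.derivative (1 + Polynomial.X + Polynomial.X ^ 2 : Polynomial ℤ)
        = 1 + 2 * Polynomial.X := by simp
    cases n with
    | zero => simp
    | succ m =>
      rw [Polynomial.derivative_pow, hdp]
      push_cast
      ring
  have hco := congrArg (fun q => Polynomial.coeff q k) key
  simp only at hco
  rw [pv_tri_coeff] at hco
  have hrhs : (1 + 2 * Polynomial.X) * (1 + Polynomial.X + Polynomial.X ^ 2 : Polynomial ℤ) ^ n
      = (1 + Polynomial.X + Polynomial.X ^ 2 : Polynomial ℤ) ^ n * 1
        + Polynomial.C 2 * ((1 + Polynomial.X + Polynomial.X ^ 2 : Polynomial ℤ) ^ n * Polynomial.X ^ 1) := by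
    rw [map_ofNat Polynomial.C 2]; ring
  rw [hrhs] at hco
  simp only [Polynomial.coeff_derivative, Polynomial.coeff_C_mul, Polynomial.coeff_add,
    mul_one, Polynomial.coeff_mul_X_pow'] at hco
  change (pvC n (k + 1) * ((k:ℤ) + 1)
      + (if 1 ≤ k then pvC n ((k - 1) + 1) * (((k-1:ℕ):ℤ) + 1) else 0)
      + (if 2 ≤ k then pvC n ((k - 2) + 1) * (((k-2:ℕ):ℤ) + 1) else 0))
      = (n:ℤ) * (pvC n k + 2 * (if 1 ≤ k then pvC n (k - 1) else 0)) at hco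
  rw [if_pos hk, if_pos hk] at hco
  have e1 : k - 1 + 1 = k := by omega
  have e1' : ((k - 1 : ℕ) : ℤ) = (k:ℤ) - 1 := by omega
  rw [e1, e1'] at hco
  by_cases h2 : 2 ≤ k
  · rw [if_pos h2] at hco
    have e2 : k - 2 + 1 = k - 1 := by omega
    have e2' : ((k - 2 : ℕ) : ℤ) = (k:ℤ) - 2 := by omega
    rw [e2, e2'] at hco
    linear_combination hco
  · rw [if_neg h2] at hco
    have hk1 : k = 1 := by omega
    subst hk1
    norm_num at hco ⊢
    linear_combination hco

-- B's exact division
lemma pvC_div (n k : ℕ) (hk : 1 ≤ k) :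
    PySem.Int.floordiv (((n : ℤ) - k) * pvC n k + (2 * (n:ℤ) - k + 1) * pvC n (k - 1))
        ((k : ℤ) + 1) = pvC n (k + 1) := by
  rw [← pvC_holo n k hk, PySem.Int.floordiv_eq_ediv_of_pos (by positivity),
    Int.mul_ediv_cancel_left _ (by omega)]

-- a row, after the optional mod-2 pass
noncomputable def pvRowP (flag : Bool) (n : ℕ) : List Int :=
  (List.range (2 * n + 1)).map (fun k => if flag then PySem.Int.mod (pvC n k) 2 else pvC n k)

lemma pvRowP_zero (flag : Bool) : pvRowP flag 0 = [1] := by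
  cases flag <;> simp [pvRowP, pvC_zero]


-- A's outer-loop body, abbreviated for the proofs
def pvStepA (flag : Bool) (result : List (List Int)) (i : Int) : List (List Int) :=
  result ++ [(PySem.List.pyRange 0 (2 * i + 1) 1).foldl
    (fun row_i j =>
      let up_left := if ¬ (2 ≤ j ∧ j < 2 * i + 1) then 0
        else PySem.List.pyGetD (PySem.List.pyGetD result (i - 1) []) (j - 2) 0
      let up := if ¬ (1 ≤ j ∧ j < 2 * i) then 0
        else PySem.List.pyGetD (PySem.List.pyGetD result (i - 1) []) (j - 1) 0
      let up_right := if ¬ (0 ≤ j ∧ j < 2 * i - 1) then 0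
        else PySem.List.pyGetD (PySem.List.pyGetD result (i - 1) []) j 0
      if flag then
        if PySem.Int.mod (up_left + up + up_right) 2 = 0 then row_i ++ [0]
        else row_i ++ [1]
      else row_i ++ [up_left + up + up_right]) []]

-- B's outer-loop body, abbreviated for the proofs
def pvStepB (flag : Bool) (result : List (List Int)) (n : Int) : List (List Int) :=
  let row := (PySem.List.pyRange 1 (2 * n) 1).foldl
    (fun row k =>
      row ++ [PySem.Int.floordiv
        ((n - k) * PySem.List.pyGetD row k 0
          + (2 * n - k + 1) * PySem.List.pyGetD row (k - 1) 0) (k + 1)])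
    [1, n]
  let row := if flag then row.map (fun v => PySem.Int.mod v 2) else row
  result ++ [row]

-- B's inner loop computes the coefficient row of (1+x+x^2)^n left to right
lemma pvB_inner (n : ℕ) : ∀ j : ℕ, j ≤ 2 * n - 1 →
    (PySem.List.pyRange 1 (1 + (j : ℤ)) 1).foldl
      (fun row k =>
        row ++ [PySem.Int.floordiv
          (((n : ℤ) - k) * PySem.List.pyGetD row k 0
            + (2 * (n : ℤ) - k + 1) * PySem.List.pyGetD row (k - 1) 0) (k + 1)])
      [1, (n : ℤ)]
    = (List.range (j + 2)).map (pvC n) := by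
  intro j
  induction j with
  | zero =>
    intro _
    rw [show (1 + ((0:ℕ):ℤ)) = 1 by norm_num, PySem.List.pyRange_one_eq_nil le_rfl]
    simp [List.range_succ, pvC_zero, pvC_one]
  | succ m ih =>
    intro hm
    rw [show (1 + ((m+1:ℕ):ℤ)) = (1 + (m:ℤ)) + 1 by push_cast; ring,
      PySem.List.pyRange_one_succ_right (by omega), List.foldl_append,
      ih (by omega)]
    simp only [List.foldl_cons, List.foldl_nil]
    have g1 : PySem.List.pyGetD ((List.range (m + 2)).map (pvC n)) (1 + (m:ℤ)) 0
        = pvC n (m + 1) := by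
      rw [show (1 + (m:ℤ)) = ((m + 1 : ℕ) : ℤ) by push_cast; ring,
        PySem.List.pyGetD_natCast]
      simp [List.getD_eq_getElem?_getD, List.getElem?_map, ]
    have g2 : PySem.List.pyGetD ((List.range (m + 2)).map (pvC n)) (1 + (m:ℤ) - 1) 0
        = pvC n m := by
      rw [show (1 + (m:ℤ) - 1) = ((m : ℕ) : ℤ) by ring,
        PySem.List.pyGetD_natCast]
      simp [List.getD_eq_getElem?_getD, List.getElem?_map, ]
    rw [g1, g2]
    have hdiv := pvC_div n (m + 1) (by omega)
    rw [show ((m + 1 : ℕ) : ℤ) = (m:ℤ) + 1 by push_cast; ring,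
      show (m + 1) - 1 = m from rfl] at hdiv
    rw [show ((n:ℤ) - (1 + (m:ℤ))) = (n:ℤ) - ((m:ℤ) + 1) by ring,
      show (2 * (n:ℤ) - (1 + (m:ℤ)) + 1) = 2 * (n:ℤ) - ((m:ℤ) + 1) + 1 by ring,
      show ((1 + (m:ℤ)) + 1) = ((m:ℤ) + 1) + 1 by ring, hdiv]
    simp [List.range_succ]

-- B's step appends the posted coefficient row
lemma pvB_step (flag : Bool) (i : Int) (hi : 1 ≤ i) (res : List (List Int)) :
    pvStepB flag res i = res ++ [pvRowP flag i.toNat] := by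
  unfold pvStepB
  have hn : ((i.toNat : ℕ) : ℤ) = i := by omega
  have hrow : (PySem.List.pyRange 1 (2 * i) 1).foldl
      (fun row k =>
        row ++ [PySem.Int.floordiv
          ((i - k) * PySem.List.pyGetD row k 0
            + (2 * i - k + 1) * PySem.List.pyGetD row (k - 1) 0) (k + 1)])
      [1, i]
      = (List.range (2 * i.toNat + 1)).map (pvC i.toNat) := by
    have := pvB_inner i.toNat (2 * i.toNat - 1) le_rfl
    rw [show (1 + ((2 * i.toNat - 1 : ℕ) : ℤ)) = 2 * i by omega] at this
    rw [show (2 * i.toNat - 1) + 2 = 2 * i.toNat + 1 by omega] at this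
    rw [← this, hn]
  rw [hrow]
  cases flag
  · simp only [Bool.false_eq_true, if_false, pvRowP]
  · simp only [if_true, pvRowP, List.map_map]
    rfl

-- the three guarded lookups sum to the next row's coefficient
lemma pvA_cell_sum (n' k : ℕ) (hk : k < 2 * (n' + 1) + 1) :
    (if 2 ≤ k then pvC n' (k - 2) else 0)
      + (if 1 ≤ k ∧ k < 2 * n' + 2 then pvC n' (k - 1) else 0)
      + (if k < 2 * n' + 1 then pvC n' k else 0)
    = pvC (n' + 1) k := by
  rw [pvC_succ]
  have hC : (if k < 2 * n' + 1 then pvC n' k else 0) = pvC n' k := by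
    split_ifs with h
    · rfl
    · exact (pvC_eq_zero (by omega)).symm
  have hB : (if 1 ≤ k ∧ k < 2 * n' + 2 then pvC n' (k - 1) else 0)
      = (if 1 ≤ k then pvC n' (k - 1) else 0) := by
    by_cases h1 : 1 ≤ k
    · by_cases h2 : k < 2 * n' + 2
      · rw [if_pos ⟨h1, h2⟩, if_pos h1]
      · rw [if_neg (by omega), if_pos h1]
        exact (pvC_eq_zero (by omega)).symm
    · rw [if_neg (by omega), if_neg h1]
  rw [hC, hB]
  ring

-- one entry of the posted row pvRowP
lemma pvRowP_getD (flag : Bool) (n' m : ℕ) (hm : m < 2 * n' + 1) :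
    PySem.List.pyGetD (pvRowP flag n') ((m : ℕ) : ℤ) 0
      = (if flag then PySem.Int.mod (pvC n' m) 2 else pvC n' m) := by
  rw [PySem.List.pyGetD_natCast]
  unfold pvRowP
  simp [List.getD_eq_getElem?_getD, List.getElem?_map, List.getElem?_range hm]

-- one cell of A's row, from the posted previous row
lemma pvA_cell (flag : Bool) (n' : ℕ) (i : Int) (hi : i = (n' : ℤ) + 1) (k : ℕ)
    (hk : k < 2 * (n' + 1) + 1) :
    (let up_left := if ¬ (2 ≤ (k:ℤ) ∧ (k:ℤ) < 2 * i + 1) then 0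
       else PySem.List.pyGetD (pvRowP flag n') ((k:ℤ) - 2) 0
     let up := if ¬ (1 ≤ (k:ℤ) ∧ (k:ℤ) < 2 * i) then 0
       else PySem.List.pyGetD (pvRowP flag n') ((k:ℤ) - 1) 0
     let up_right := if ¬ (0 ≤ (k:ℤ) ∧ (k:ℤ) < 2 * i - 1) then 0
       else PySem.List.pyGetD (pvRowP flag n') ((k:ℤ)) 0
     if flag then (if PySem.Int.mod (up_left + up + up_right) 2 = 0 then (0:ℤ) else 1)
     else up_left + up + up_right)
    = (if flag then PySem.Int.mod (pvC (n' + 1) k) 2 else pvC (n' + 1) k) := by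
  subst hi
  have g_ul : (if ¬ (2 ≤ (k:ℤ) ∧ (k:ℤ) < 2 * ((n' : ℤ) + 1) + 1) then (0:ℤ)
      else PySem.List.pyGetD (pvRowP flag n') ((k:ℤ) - 2) 0)
      = (if 2 ≤ k then (if flag then PySem.Int.mod (pvC n' (k - 2)) 2 else pvC n' (k - 2)) else 0) := by
    by_cases h : 2 ≤ k
    · rw [if_neg (by omega), show ((k:ℤ) - 2) = ((k - 2 : ℕ) : ℤ) by omega,
        pvRowP_getD flag n' (k - 2) (by omega), if_pos h]
    · rw [if_pos (by omega), if_neg h]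
  have g_up : (if ¬ (1 ≤ (k:ℤ) ∧ (k:ℤ) < 2 * ((n' : ℤ) + 1)) then (0:ℤ)
      else PySem.List.pyGetD (pvRowP flag n') ((k:ℤ) - 1) 0)
      = (if 1 ≤ k ∧ k < 2 * n' + 2 then (if flag then PySem.Int.mod (pvC n' (k - 1)) 2 else pvC n' (k - 1)) else 0) := by
    by_cases h : 1 ≤ k ∧ k < 2 * n' + 2
    · rw [if_neg (by omega), show ((k:ℤ) - 1) = ((k - 1 : ℕ) : ℤ) by omega,
        pvRowP_getD flag n' (k - 1) (by omega), if_pos h]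
    · rw [if_pos (by omega), if_neg h]
  have g_ur : (if ¬ (0 ≤ (k:ℤ) ∧ (k:ℤ) < 2 * ((n' : ℤ) + 1) - 1) then (0:ℤ)
      else PySem.List.pyGetD (pvRowP flag n') ((k:ℤ)) 0)
      = (if k < 2 * n' + 1 then (if flag then PySem.Int.mod (pvC n' k) 2 else pvC n' k) else 0) := by
    by_cases h : k < 2 * n' + 1
    · rw [if_neg (by omega), pvRowP_getD flag n' k (by omega), if_pos h]
    · rw [if_pos (by omega), if_neg h]
  simp only [g_ul, g_up, g_ur]
  cases flag
  · simp only [Bool.false_eq_true, if_false]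
    exact pvA_cell_sum n' k hk
  · simp only [if_true]
    have ea : (if 2 ≤ k then PySem.Int.mod (pvC n' (k - 2)) 2 else (0:ℤ))
        = PySem.Int.mod (if 2 ≤ k then pvC n' (k - 2) else 0) 2 := by
      split_ifs
      · rfl
      · decide
    have eb : (if 1 ≤ k ∧ k < 2 * n' + 2 then PySem.Int.mod (pvC n' (k - 1)) 2 else (0:ℤ))
        = PySem.Int.mod (if 1 ≤ k ∧ k < 2 * n' + 2 then pvC n' (k - 1) else 0) 2 := by
      split_ifs
      · rfl
      · decide
    have ec : (if k < 2 * n' + 1 then PySem.Int.mod (pvC n' k) 2 else (0:ℤ))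
        = PySem.Int.mod (if k < 2 * n' + 1 then pvC n' k else 0) 2 := by
      split_ifs
      · rfl
      · decide
    rw [ea, eb, ec]
    have hsum := pvA_cell_sum n' k hk
    set A' := (if 2 ≤ k then pvC n' (k - 2) else (0:ℤ))
    set B' := (if 1 ≤ k ∧ k < 2 * n' + 2 then pvC n' (k - 1) else (0:ℤ))
    set C' := (if k < 2 * n' + 1 then pvC n' k else (0:ℤ))
    rw [← hsum]
    simp only [PySem.Int.mod_eq_emod_of_pos (by norm_num : (0:ℤ) < 2)]
    split_ifs with h0 <;> omega

-- A's step appends the posted coefficient row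
lemma pvA_step (flag : Bool) (i : Int) (hi : 1 ≤ i) (res : List (List Int))
    (hres : res = (List.range i.toNat).map (pvRowP flag)) :
    pvStepA flag res i = res ++ [pvRowP flag i.toNat] := by
  obtain ⟨m, hm⟩ : ∃ m, i.toNat = m + 1 := ⟨i.toNat - 1, by omega⟩
  rw [hm]
  have hprev : PySem.List.pyGetD res (i - 1) [] = pvRowP flag m := by
    rw [hres, PySem.List.pyGetD_eq_getElem _ _ (by omega)
      (by simp only [List.length_map, List.length_range]; omega)]
    rw [List.getElem_map, List.getElem_range]
    congr 1
    omega
  unfold pvStepA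
  have hcong : (PySem.List.pyRange 0 (2 * i + 1) 1).foldl
      (fun row_i j =>
        let up_left := if ¬ (2 ≤ j ∧ j < 2 * i + 1) then 0
          else PySem.List.pyGetD (PySem.List.pyGetD res (i - 1) []) (j - 2) 0
        let up := if ¬ (1 ≤ j ∧ j < 2 * i) then 0
          else PySem.List.pyGetD (PySem.List.pyGetD res (i - 1) []) (j - 1) 0
        let up_right := if ¬ (0 ≤ j ∧ j < 2 * i - 1) then 0
          else PySem.List.pyGetD (PySem.List.pyGetD res (i - 1) []) j 0
        if flag then
          if PySem.Int.mod (up_left + up + up_right) 2 = 0 then row_i ++ [0]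
          else row_i ++ [1]
        else row_i ++ [up_left + up + up_right]) []
      = (PySem.List.pyRange 0 (2 * i + 1) 1).foldl
        (fun acc j => acc ++ [
          let up_left := if ¬ (2 ≤ j ∧ j < 2 * i + 1) then 0
            else PySem.List.pyGetD (pvRowP flag m) (j - 2) 0
          let up := if ¬ (1 ≤ j ∧ j < 2 * i) then 0
            else PySem.List.pyGetD (pvRowP flag m) (j - 1) 0
          let up_right := if ¬ (0 ≤ j ∧ j < 2 * i - 1) then 0
            else PySem.List.pyGetD (pvRowP flag m) j 0
          if flag then (if PySem.Int.mod (up_left + up + up_right) 2 = 0 then (0:ℤ) else 1)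
          else up_left + up + up_right]) [] := by
    apply PySem.List.foldl_congr_mem
    intro acc j _
    cases flag <;> simp only [hprev] <;> split_ifs <;> rfl
  rw [hcong, PySem.List.foldl_append_singleton_eq_map]
  simp only [List.nil_append]
  congr 1
  congr 1
  rw [PySem.List.pyRange_one, sub_zero, show (2 * i + 1).toNat = 2 * (m + 1) + 1 by omega,
    List.map_map]
  apply List.ext_getElem
  · simp only [List.length_map, List.length_range, pvRowP]
  · intro k h1 h2
    simp only [List.getElem_map, List.getElem_range, Function.comp, zero_add]
    have hk : k < 2 * (m + 1) + 1 := by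
      simpa using h1
    have hg : (pvRowP flag (m + 1))[k]'h2
        = (if flag then PySem.Int.mod (pvC (m + 1) k) 2 else pvC (m + 1) k) := by
      simp [pvRowP]
    rw [hg]
    have := pvA_cell flag m i (by omega) k hk
    simp only at this
    exact this

-- the outer loop, generically in the step function
lemma pvLoop (flag : Bool) (step : List (List Int) → Int → List (List Int))
    (hstep : ∀ (res : List (List Int)) (i : Int), 1 ≤ i →
      res = (List.range i.toNat).map (pvRowP flag) →
      step res i = res ++ [pvRowP flag i.toNat]) :
    ∀ (k : ℕ) (i : Int), 1 ≤ i →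
      (PySem.List.pyRange i (i + (k : ℤ)) 1).foldl step
          ((List.range i.toNat).map (pvRowP flag))
        = (List.range (i + (k : ℤ)).toNat).map (pvRowP flag) := by
  intro k
  induction k with
  | zero =>
    intro i hi
    rw [show (i + ((0:ℕ):ℤ)) = i by norm_num, PySem.List.pyRange_one_eq_nil le_rfl]
    rfl
  | succ m ih =>
    intro i hi
    rw [show (i + ((m+1:ℕ):ℤ)) = (i + 1) + (m:ℤ) by push_cast; ring,
      PySem.List.pyRange_one_cons (by omega), List.foldl_cons,
      hstep _ i hi rfl]
    have hnext : ((List.range i.toNat).map (pvRowP flag)) ++ [pvRowP flag i.toNat]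
        = (List.range (i + 1).toNat).map (pvRowP flag) := by
      rw [show (i + 1).toNat = i.toNat + 1 by omega, List.range_succ, List.map_append]
      rfl
    rw [hnext]
    exact ih (i + 1) (by omega)

-- ===== VERDICT (by name: the statement is the Claim_ definition above) =====
theorem generate_yh_triangle_spec : Claim_equal_generate_yh_triangle := by
  intro N flag _
  unfold Spec_generate_yh_triangle generate_yh_triangle generate_yh_triangle_alt
  by_cases hN : N ≤ 1
  · rw [PySem.List.pyRange_one_eq_nil hN]
    rfl
  · have hbase : ([[1]] : List (List Int)) = (List.range (1:Int).toNat).map (pvRowP flag) := by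
      simp [pvRowP_zero]
    have hA := pvLoop flag (pvStepA flag) (fun res i hi hres => pvA_step flag i hi res hres)
      (N - 1).toNat 1 le_rfl
    have hB := pvLoop flag (pvStepB flag) (fun res i hi _ => pvB_step flag i hi res)
      (N - 1).toNat 1 le_rfl
    rw [show ((1:Int) + (((N-1).toNat : ℕ) : ℤ)) = N by omega] at hA hB
    rw [hbase]
    exact hA.trans hB.symm
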